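-- pv_equiv track=rewrite | github.com/pypi-data/pypi-mirror-72 | packages/bare/bare-0.4.0.tar.gz/bare-0.4.0/bare/__init__.py | _unpack_varint
-- ===== SOURCE A (Python) =====
-- def _unpack_varint(data, offset, signed=False):
--     i = 0
--     shift = 0
--     result = 0
--     while True:
--         byte = data[offset + i]
--         if byte < 0x80:
--             value = result | byte << shift
--
--             if signed:
--                 sign = value % 2
--                 value = value // 2
--                 if sign:
--                     value = -1 * (value + 1)
--
--             return value, offset + i + 1
--         result |= (byte & 0x7f) << shift
--         shift += 7
--         i += 1
-- ===== SOURCE B (Python) =====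
-- def _unpack_varint(data, offset, signed=False):
--     # Two-pass decode: scan to the terminal byte, then sum the disjoint 7-bit
--     # chunks arithmetically (chunks never overlap, so + replaces |).
--     end = offset
--     while data[end] >= 0x80:
--         end += 1
--     n = end - offset
--     value = data[end] << (7 * n)
--     for p in range(n):
--         value += (data[offset + p] & 0x7f) << (7 * p)
--     if signed:
--         value = -(value // 2 + 1) if value % 2 else value // 2
--     return value, end + 1
-- ===== Notes on version B (the rewrite author's own statement) =====
-- stated objective: alternative
-- what changed: Single accumulate-as-you-scan OR-loop replaced by a two-pass decode: first scan forward to find the terminal byte, then sum the disjoint 7-bit chunks arithmetically (+ and << instead of incremental |=, with the terminal byte placed first).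
import Mathlib
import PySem

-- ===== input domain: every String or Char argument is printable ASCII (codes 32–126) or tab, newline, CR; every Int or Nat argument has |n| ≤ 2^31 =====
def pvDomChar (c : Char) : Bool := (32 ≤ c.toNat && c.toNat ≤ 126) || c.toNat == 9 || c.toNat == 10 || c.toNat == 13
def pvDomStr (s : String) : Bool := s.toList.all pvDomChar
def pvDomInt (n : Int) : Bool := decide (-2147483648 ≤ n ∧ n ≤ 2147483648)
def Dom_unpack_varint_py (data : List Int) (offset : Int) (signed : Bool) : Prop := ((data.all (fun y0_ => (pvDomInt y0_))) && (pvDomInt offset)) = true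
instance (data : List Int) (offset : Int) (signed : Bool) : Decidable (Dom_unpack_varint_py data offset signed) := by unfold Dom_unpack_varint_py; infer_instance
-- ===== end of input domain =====

-- B replaces A's accumulate-as-you-scan OR-loop by a two-pass decode (scan to the terminal
-- byte, then sum the disjoint 7-bit chunks arithmetically); return values only (neither
-- program mutates its arguments).

-- ===== PORT A =====
-- A's 'while True' loop; fuel bounds the iteration count (it suffices on every input:
-- the scan stops at the terminal byte or runs off the end of the list).
def pvALoop (data : List Int) (offset : Int) (signed : Bool) : Nat → Int → Nat → Int → Int × Int
  | 0, _, _, _ => (0, 0)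
  | fuel+1, i, shift, result =>
    match PySem.List.pyGet? data (offset + i) with
    | none => (0, 0)  -- IndexError: excluded by Pre_
    | some byte =>
      if byte < 128 then
        let value := PySem.Int.bor result (byte <<< shift)
        if signed then
          let sign := PySem.Int.mod value 2
          let value2 := PySem.Int.floordiv value 2
          (if sign ≠ 0 then -1 * (value2 + 1) else value2, offset + i + 1)
        else (value, offset + i + 1)
      else pvALoop data offset signed fuel (i + 1) (shift + 7) (PySem.Int.bor result (PySem.Int.band byte 127 <<< shift))

def unpack_varint_py (data : List Int) (offset : Int) (signed : Bool) : Int × Int :=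
  pvALoop data offset signed (((data.length : Int) - offset).toNat + 1) 0 0 0

-- ===== PORT B =====
-- pass 1 of Source B: end = offset; while data[end] >= 0x80: end += 1
def pvFindEnd (data : List Int) : Nat → Int → Option Int
  | 0, _ => none
  | fuel+1, j =>
    match PySem.List.pyGet? data j with
    | none => none  -- IndexError: excluded by Pre_
    | some b => if 128 ≤ b then pvFindEnd data fuel (j + 1) else some j

def unpack_varint_py_alt (data : List Int) (offset : Int) (signed : Bool) : Int × Int :=
  match pvFindEnd data (((data.length : Int) - offset).toNat + 1) offset with
  | none => (0, 0)
  | some e =>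
    let n := (e - offset).toNat
    -- pass 2 of Source B: value = data[end] << 7n; for p in range(n): value += (data[offset+p] & 0x7f) << 7p
    let value := (List.range n).foldl
      (fun acc (p : Nat) => acc + (PySem.Int.band ((PySem.List.pyGet? data (offset + (p : Int))).getD 0) 127 <<< (7 * p)))
      (((PySem.List.pyGet? data e).getD 0) <<< (7 * n))
    let value := if signed then
        (if PySem.Int.mod value 2 ≠ 0 then -(PySem.Int.floordiv value 2 + 1) else PySem.Int.floordiv value 2)
      else value
    (value, e + 1)

-- ===== PRECONDITION & SPEC =====
-- Pre_: exactly the inputs where Python A returns (no IndexError): the start index is not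
-- below -len(data) and some in-range position ≥ offset holds a terminal byte (< 0x80).
def Pre_unpack_varint_py (data : List Int) (offset : Int) (signed : Bool) : Prop :=
  -(data.length : Int) ≤ offset ∧
    ∃ p ∈ Finset.range (((data.length : Int) - offset).toNat),
      ((PySem.List.pyGet? data (offset + (p : Int))).getD 128) < 128
instance (data : List Int) (offset : Int) (signed : Bool) : Decidable (Pre_unpack_varint_py data offset signed) := by unfold Pre_unpack_varint_py; infer_instance

def pvWitness_unpack_varint_py : List Int × Int × Bool := ([5], 0, false)

def Spec_unpack_varint_py (data : List Int) (offset : Int) (signed : Bool) (out : Int × Int) : Prop := out = unpack_varint_py_alt data offset signed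
instance (data : List Int) (offset : Int) (signed : Bool) (out : Int × Int) : Decidable (Spec_unpack_varint_py data offset signed out) := by unfold Spec_unpack_varint_py; infer_instance

-- ===== CLAIM (what is proved, stated in full; the proofs are below) =====
def Claim_equal_unpack_varint_py : Prop := ∀ (data : List Int) (offset : Int) (signed : Bool), Dom_unpack_varint_py data offset signed → Pre_unpack_varint_py data offset signed → Spec_unpack_varint_py data offset signed (unpack_varint_py data offset signed)

-- ===== LEMMAS AND PROOFS =====

-- the signed zigzag fix-up, written as A's port writes it
def pvFinish (signed : Bool) (v : Int) (c : Int) : Int × Int :=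
  (if signed then
      (if PySem.Int.mod v 2 ≠ 0 then -1 * (PySem.Int.floordiv v 2 + 1) else PySem.Int.floordiv v 2)
    else v, c)

-- the chunk sum from position j: n masked continuation bytes, then the terminal byte
def pvSum (data : List Int) : Nat → Nat → Int → Int
  | s, 0, j => ((PySem.List.pyGet? data j).getD 0) <<< s
  | s, n+1, j => (PySem.Int.band ((PySem.List.pyGet? data j).getD 0) 127 <<< s) + pvSum data (s + 7) n (j + 1)

lemma pv_band127_nonneg (b : Int) : 0 ≤ PySem.Int.band b 127 := by
  unfold PySem.Int.band
  split_ifs <;> omega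

lemma pv_band127_lt (b : Int) : PySem.Int.band b 127 < 128 := by
  unfold PySem.Int.band
  have h1 : b.toNat &&& (127:Int).toNat ≤ 127 := Nat.and_le_right
  have h2 : (127:Int).toNat &&& (-b-1).toNat ≤ 127 := Nat.and_le_left
  split_ifs <;> omega

-- a mask whose low k bits are all ones fixes every r < 2^k
lemma pv_mask_and (H r k : Nat) (hH : 1 ≤ H) (hr : r < 2 ^ k) :
    (H * 2 ^ k - 1) &&& r = r := by
  apply Nat.eq_of_testBit_eq; intro i
  rw [Nat.testBit_and]
  by_cases hik : i < k
  · have hmod : (H * 2 ^ k - 1) % 2 ^ k = 2 ^ k - 1 := by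
      have h1 : H * 2 ^ k - 1 = 2 ^ k * (H - 1) + (2 ^ k - 1) := by
        have h2 : 2 ^ k * (H - 1) = H * 2 ^ k - 2 ^ k := by
          rw [Nat.mul_comm, Nat.sub_one_mul]
        have h3 : 0 < 2 ^ k := Nat.two_pow_pos k
        have h4 : 2 ^ k ≤ H * 2 ^ k := Nat.le_mul_of_pos_left _ (by omega)
        omega
      rw [h1, Nat.mul_add_mod, Nat.mod_eq_of_lt (by have := Nat.two_pow_pos k; omega)]
    have hc : (H * 2 ^ k - 1).testBit i = true := by
      have := Nat.testBit_mod_two_pow (H * 2 ^ k - 1) k i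
      rw [hmod, Nat.testBit_two_pow_sub_one] at this
      simpa [hik] using this.symm
    simp [hc]
  · have hf : r.testBit i = false :=
      Nat.testBit_lt_two_pow (Nat.lt_of_lt_of_le hr (Nat.pow_le_pow_right (by omega) (by omega)))
    simp [hf]

-- disjoint-bits OR is addition: r occupies only the low k bits, hi * 2^k none of them
lemma pv_bor_low_add (hi r : Int) (k : Nat) (h0 : 0 ≤ r) (h1 : r < 2 ^ k) :
    PySem.Int.bor r (hi * 2 ^ k) = hi * 2 ^ k + r := by
  have hrlt : r.toNat < 2 ^ k := by
    have hk : ((2 ^ k : Nat) : Int) = (2 : Int) ^ k := by push_cast; ring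
    omega
  rcases le_or_gt (0:Int) hi with hhi | hhi
  · have hb : hi * 2 ^ k = ((hi.toNat * 2 ^ k : Nat) : Int) := by
      push_cast
      rw [Int.toNat_of_nonneg hhi]
    have hbn : (0:Int) ≤ hi * 2 ^ k := by rw [hb]; positivity
    unfold PySem.Int.bor
    rw [if_pos h0, if_pos hbn, hb, Int.toNat_natCast]
    have hor := Nat.two_pow_add_eq_or_of_lt (i := k) hrlt hi.toNat
    rw [Nat.lor_comm, Nat.mul_comm] at hor
    omega
  · have hH : 1 ≤ (-hi).toNat := by omega
    have h9 : (((-hi).toNat * 2 ^ k : Nat) : Int) = -(hi * 2 ^ k) := by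
      push_cast
      rw [Int.toNat_of_nonneg (by omega : (0:Int) ≤ -hi)]
      ring
    have h7 : 2 ^ k ≤ (-hi).toNat * 2 ^ k := Nat.le_mul_of_pos_left _ (by omega)
    have hb : -(hi * 2 ^ k) - 1 = (((-hi).toNat * 2 ^ k - 1 : Nat) : Int) := by
      omega
    have hbneg : ¬ (0:Int) ≤ hi * 2 ^ k := by
      have h3 : (0:Int) < 2 ^ k := by positivity
      nlinarith
    unfold PySem.Int.bor
    rw [if_pos h0, if_neg hbneg, hb, Int.toNat_natCast, pv_mask_and _ _ _ hH hrlt]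
    omega

lemma pvFindEnd_le (data : List Int) :
    ∀ (fuel : Nat) (j e : Int), pvFindEnd data fuel j = some e → j ≤ e := by
  intro fuel
  induction fuel with
  | zero => intro j e h; simp [pvFindEnd] at h
  | succ fuel ih =>
    intro j e h
    unfold pvFindEnd at h
    cases hg : PySem.List.pyGet? data j with
    | none => rw [hg] at h; simp at h
    | some b =>
      rw [hg] at h
      simp only at h
      by_cases hb : 128 ≤ b
      · rw [if_pos hb] at h; have := ih (j+1) e h; omega
      · rw [if_neg hb] at h; simp at h; omega

-- invariant of A's loop: it computes the chunk sum of the bytes up to the terminal one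
lemma pvALoop_eq (data : List Int) (offset : Int) (signed : Bool) :
    ∀ (fuel : Nat) (i : Int) (shift : Nat) (result : Int), 0 ≤ result → result < 2 ^ shift →
      pvALoop data offset signed fuel i shift result =
        (match pvFindEnd data fuel (offset + i) with
          | none => (0, 0)
          | some e => pvFinish signed (result + pvSum data shift ((e - (offset + i)).toNat) (offset + i)) (e + 1)) := by
  intro fuel
  induction fuel with
  | zero => intro i shift result _ _; simp [pvALoop, pvFindEnd]
  | succ fuel ih =>
    intro i shift result hr0 hr1
    unfold pvALoop pvFindEnd
    cases hg : PySem.List.pyGet? data (offset + i) with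
    | none => simp
    | some byte =>
      simp only
      by_cases hb : byte < 128
      · rw [if_pos hb, if_neg (show ¬ (128:Int) ≤ byte by omega)]
        have hv : PySem.Int.bor result (byte <<< shift) = result + pvSum data shift ((offset + i - (offset + i)).toNat) (offset + i) := by
          simp only [Int.sub_self, Int.toNat_zero, pvSum, hg, Option.getD_some,
            Int.shiftLeft_eq]
          rw [pv_bor_low_add byte result shift hr0 hr1]
          ring
        cases signed <;> simp only [pvFinish, hv] <;> simp
      · rw [if_neg hb, if_pos (show (128:Int) ≤ byte by omega)]
        have hm0 := pv_band127_nonneg byte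
        have hm1 := pv_band127_lt byte
        have hstep : PySem.Int.bor result (PySem.Int.band byte 127 <<< shift)
            = PySem.Int.band byte 127 * 2 ^ shift + result := by
          rw [Int.shiftLeft_eq, pv_bor_low_add _ result shift hr0 hr1]
        have hnb : PySem.Int.band byte 127 * 2 ^ shift + result < 2 ^ (shift + 7) := by
          have h2 : (0:Int) < 2 ^ shift := by positivity
          have : (2:Int) ^ (shift + 7) = 2 ^ shift * 128 := by rw [pow_add]; norm_num
          nlinarith
        rw [hstep, ih (i+1) (shift+7) _ (by positivity) hnb]
        have harg : offset + (i + 1) = offset + i + 1 := by ring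
        rw [harg]
        cases hf : pvFindEnd data fuel (offset + i + 1) with
        | none => simp
        | some e =>
          simp only
          have hle := pvFindEnd_le data fuel _ _ hf
          have hn : (e - (offset + i)).toNat = (e - (offset + i + 1)).toNat + 1 := by omega
          rw [hn]
          simp only [pvSum, hg, Option.getD_some]
          congr 1
          rw [Int.shiftLeft_eq]
          ring

lemma pv_foldl_add_shift (g : Nat → Int) (l : List Nat) :
    ∀ init : Int, l.foldl (fun a p => a + g p) init = init + l.foldl (fun a p => a + g p) 0 := by
  induction l with
  | nil => intro init; simp
  | cons x xs ih =>
    intro init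
    simp only [List.foldl_cons]
    rw [ih (init + g x), ih (0 + g x)]
    ring

-- B's second pass computes the same chunk sum
lemma pvSum_eq_foldl (data : List Int) :
    ∀ (n : Nat) (s : Nat) (j : Int),
      pvSum data s n j =
        (List.range n).foldl
          (fun acc (p : Nat) => acc + (PySem.Int.band ((PySem.List.pyGet? data (j + (p : Int))).getD 0) 127 <<< (s + 7 * p)))
          (((PySem.List.pyGet? data (j + (n : Int))).getD 0) <<< (s + 7 * n)) := by
  intro n
  induction n with
  | zero => intro s j; simp [pvSum]
  | succ n ih =>
    intro s j
    rw [List.range_succ_eq_map, List.foldl_cons, List.foldl_map]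
    simp only [pvSum]
    rw [ih (s + 7) (j + 1)]
    have hidx : ∀ p : Nat, j + (Nat.succ p : Int) = j + 1 + (p : Int) := by intro p; push_cast; ring
    have hexp : ∀ p : Nat, s + 7 * Nat.succ p = s + 7 + 7 * p := by intro p; omega
    have hfun : (fun (a : Int) (p : Nat) => a + (PySem.Int.band ((PySem.List.pyGet? data (j + (Nat.succ p : Int))).getD 0) 127 <<< (s + 7 * Nat.succ p)))
        = fun (a : Int) (p : Nat) => a + (PySem.Int.band ((PySem.List.pyGet? data (j + 1 + (p : Int))).getD 0) 127 <<< (s + 7 + 7 * p)) := by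
      funext a p; rw [hidx p, hexp p]
    rw [hfun]
    have hterm : j + ((n + 1 : Nat) : Int) = j + 1 + (n : Int) := hidx n
    have hexp2 : s + 7 * (n + 1) = s + 7 + 7 * n := hexp n
    rw [hterm, hexp2]
    conv_lhs => rw [pv_foldl_add_shift]
    conv_rhs => rw [pv_foldl_add_shift]
    simp only [Nat.mul_zero, Nat.cast_zero, add_zero]
    ring

lemma pv_main (data : List Int) (offset : Int) (signed : Bool) :
    unpack_varint_py data offset signed = unpack_varint_py_alt data offset signed := by
  unfold unpack_varint_py unpack_varint_py_alt
  rw [pvALoop_eq data offset signed _ 0 0 0 (le_refl 0) (by norm_num)]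
  rw [Int.add_zero]
  cases hf : pvFindEnd data (((data.length : Int) - offset).toNat + 1) offset with
  | none => simp
  | some e =>
    simp only
    have hle := pvFindEnd_le data _ _ _ hf
    have hcast : offset + (((e - offset).toNat : Nat) : Int) = e := by omega
    rw [pvSum_eq_foldl data ((e - offset).toNat) 0 offset]
    rw [hcast]
    have hfun : (fun (acc : Int) (p : Nat) => acc + (PySem.Int.band ((PySem.List.pyGet? data (offset + (p : Int))).getD 0) 127 <<< (0 + 7 * p)))
        = fun (acc : Int) (p : Nat) => acc + (PySem.Int.band ((PySem.List.pyGet? data (offset + (p : Int))).getD 0) 127 <<< (7 * p)) := by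
      funext a p; rw [Nat.zero_add]
    rw [Nat.zero_add, hfun]
    cases signed <;> simp only [pvFinish, zero_add] <;> (try rfl)
    congr 1
    split_ifs <;> ring

-- ===== VERDICT (by name: the statement is the Claim_ definition above) =====
theorem unpack_varint_py_spec : Claim_equal_unpack_varint_py := by
  intro data offset signed _ _
  unfold Spec_unpack_varint_py
  exact pv_main data offset signed
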